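-- pv_equiv track=rewrite | github.com/xxtiagooo/Orbito-n-FP | FP2425P2.py | obtem_linhas_diagonais
-- ===== SOURCE A (Python) =====
-- def cria_posicao(col, lin):
--     """ str x int -> posicao
--     cria uma posição com base nos inputs do utilizador
--     coluna - string entre 'a' e 'j'
--     linha - inteiro entre 1 e 10"""
--     colunas = ('a', 'b', 'c', 'd', 'e', 'f', 'g', 'h', 'i', 'j')
--     linhas = (range(1, 11))
--     if not (type(col) == str and col in colunas and type(lin) == int and lin in linhas):
--         raise ValueError("cria_posicao: argumentos invalidos")
--     return (col, lin)
--
-- def obtem_pos_col(p):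
--     """ posicao -> str
--     devolve a coluna onde a posição está inserida"""
--     return p[0]
--
-- def obtem_pos_lin(p):
--     """ posicao -> int
--     devolve a linha onde a posição está inserida"""
--     return p[1]
--
-- def coluna_para_numeros(p):  # auxiliar
--     """posicao -> int
--     transforma a coluna em numeros"""
--     return ord(obtem_pos_col(p)) - ord('a')
--
-- def numeros_para_coluna(n):  # auxiliar
--     """int -> str
--     transforma numeros em colunas"""
--     return chr(n + ord('a'))
--
-- def obtem_numero_orbitas(t):
--     """tabuleiro -> int
--     obtem o número de orbitas do tabuleiro"""
--     return len(t) // 2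
--
-- def obtem_linhas_diagonais(t, p):
--     """tabuleiro x posicao -> tuplo
--     devolve um tuplo de tuplos de dois elementos (posicao, valor) das diagonais daquela posicao"""
--     l_pos = obtem_pos_lin(p)
--     n = obtem_numero_orbitas(t)
--     linha = 2 * n
--     coluna = 2 * n
--     n_col = coluna_para_numeros(p)
--
--     def diagonal(t, l_pos, n_col, linha, coluna):
--         """tabuleiro x int x int x int x int -> tuplo
--         devolve um tuplo de tuplos de dois elementos (posicao, valor) da diagonal da posicao"""
--         diagonal = ()
--         while l_pos > 1 and n_col > 0:  # procurar primeiro elemento diagonal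
--             l_pos -= 1
--             n_col -= 1
--         while l_pos <= linha and n_col < coluna:
--             if 1 <= l_pos <= linha and 0 <= n_col < coluna:
--                 diagonal += ((cria_posicao(numeros_para_coluna(n_col),
--                              l_pos), t[l_pos-1][n_col]),)
--             l_pos += 1
--             n_col += 1
--         return diagonal
--
--     def antidiagonal(t, l_pos, n_col, linha, coluna):
--         """tabuleiro x int x int x int x int -> tuplo
--         devolve um tuplo de tuplos de dois elementos (posicao, valor) da antidiagonal da posicao"""
--         antidiagonal = ()
--         # procurar primeiro elemento antidiagonal
--         while l_pos < linha and n_col > 0: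
--             l_pos += 1
--             n_col -= 1
--         while l_pos > 0 and n_col < coluna:
--             if 1 <= l_pos <= linha and 0 <= n_col < coluna:
--                 antidiagonal += ((cria_posicao(numeros_para_coluna(n_col),
--                                  l_pos), t[l_pos-1][n_col]),)
--             l_pos -= 1
--             n_col += 1
--         return antidiagonal
--     return (diagonal(t, l_pos, n_col, linha, coluna), antidiagonal(t, l_pos, n_col, linha, coluna))
-- ===== SOURCE B (Python) =====
-- def obtem_linhas_diagonais(t, p):
--     """Closed-form version: each diagonal is generated directly from its
--     invariant (r - c = d for the diagonal, r + c = s for the antidiagonal)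
--     over an explicit index range, instead of walking to an edge first."""
--     L = 2 * (len(t) // 2)
--     r0 = p[1]
--     c0 = ord(p[0]) - ord('a')
--     d = r0 - c0
--     s = r0 + c0
--
--     def cell(r, c):
--         return ((chr(c + ord('a')), r), t[r - 1][c])
--
--     diag = tuple(cell(r, r - d) for r in range(max(1, d), min(L, d + L - 1) + 1))
--     anti = tuple(reversed([cell(r, s - r) for r in range(max(1, s - L + 1), min(L, s) + 1)]))
--     return (diag, anti)
-- ===== Notes on version B (the rewrite author's own statement) =====
-- stated objective: simpler
-- what changed: Replaces A's four while-loops (an edge-seeking backward walk plus a guarded scan for each diagonal) by closed-form index ranges derived from the diagonal invariants r-c=d and r+c=s, emitting each diagonal as a single comprehension.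
import Mathlib
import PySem

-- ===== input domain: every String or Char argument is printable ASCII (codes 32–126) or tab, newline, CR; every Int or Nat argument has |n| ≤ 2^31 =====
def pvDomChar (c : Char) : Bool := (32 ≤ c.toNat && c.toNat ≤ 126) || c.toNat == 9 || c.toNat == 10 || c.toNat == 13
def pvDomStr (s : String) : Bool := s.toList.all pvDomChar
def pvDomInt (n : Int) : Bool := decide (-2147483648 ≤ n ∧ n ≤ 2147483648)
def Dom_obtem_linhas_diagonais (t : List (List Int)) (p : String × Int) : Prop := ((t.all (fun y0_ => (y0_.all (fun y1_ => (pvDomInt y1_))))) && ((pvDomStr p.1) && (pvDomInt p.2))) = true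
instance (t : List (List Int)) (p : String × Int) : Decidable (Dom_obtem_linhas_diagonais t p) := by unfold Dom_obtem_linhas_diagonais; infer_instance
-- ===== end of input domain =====

-- B replaces A's four while-loops by closed-form index ranges from the diagonal invariants; objective: simpler.

-- ===== PORT A =====
-- first while-loop of `diagonal`: walk back to the edge
def pvA_seek1 (l c : Int) : Int × Int :=
  if h : 1 < l ∧ 0 < c then pvA_seek1 (l - 1) (c - 1) else (l, c)
termination_by c.toNat
decreasing_by omega

-- second while-loop of `diagonal` (emits cells); t[l-1][c] via pyGetD (in range under Pre_)
def pvA_diag2 (t : List (List Int)) (linha coluna l c : Int) : List ((String × Int) × Int) :=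
  if h : l ≤ linha ∧ c < coluna then
    (if 1 ≤ l ∧ l ≤ linha ∧ 0 ≤ c ∧ c < coluna then
      [((String.mk [Char.ofNat (c + 97).toNat], l), PySem.List.pyGetD (PySem.List.pyGetD t (l - 1) []) c 0)]
     else []) ++ pvA_diag2 t linha coluna (l + 1) (c + 1)
  else []
termination_by (coluna - c).toNat
decreasing_by omega

-- first while-loop of `antidiagonal`
def pvA_seek2 (linha l c : Int) : Int × Int :=
  if h : l < linha ∧ 0 < c then pvA_seek2 linha (l + 1) (c - 1) else (l, c)
termination_by c.toNat
decreasing_by omega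

-- second while-loop of `antidiagonal`
def pvA_anti2 (t : List (List Int)) (linha coluna l c : Int) : List ((String × Int) × Int) :=
  if h : 0 < l ∧ c < coluna then
    (if 1 ≤ l ∧ l ≤ linha ∧ 0 ≤ c ∧ c < coluna then
      [((String.mk [Char.ofNat (c + 97).toNat], l), PySem.List.pyGetD (PySem.List.pyGetD t (l - 1) []) c 0)]
     else []) ++ pvA_anti2 t linha coluna (l - 1) (c + 1)
  else []
termination_by (coluna - c).toNat
decreasing_by omega

def obtem_linhas_diagonais (t : List (List Int)) (p : String × Int) : (List ((String × Int) × Int)) × (List ((String × Int) × Int)) :=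
  let l_pos : Int := p.2
  let n : Int := ((t.length / 2 : Nat) : Int)
  let linha : Int := 2 * n
  let coluna : Int := 2 * n
  -- ord(p[0]) - ord('a'); p.1 has length 1 under Pre_
  let n_col : Int := ((p.1.toList.headD 'a').toNat : Int) - 97
  let s1 := pvA_seek1 l_pos n_col
  let s2 := pvA_seek2 linha l_pos n_col
  (pvA_diag2 t linha coluna s1.1 s1.2, pvA_anti2 t linha coluna s2.1 s2.2)

-- ===== PORT B =====
def pvB_cell (t : List (List Int)) (r c : Int) : (String × Int) × Int :=
  ((String.mk [Char.ofNat (c + 97).toNat], r), PySem.List.pyGetD (PySem.List.pyGetD t (r - 1) []) c 0)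

def obtem_linhas_diagonais_alt (t : List (List Int)) (p : String × Int) : (List ((String × Int) × Int)) × (List ((String × Int) × Int)) :=
  let L : Int := 2 * ((t.length / 2 : Nat) : Int)
  let r0 : Int := p.2
  let c0 : Int := ((p.1.toList.headD 'a').toNat : Int) - 97
  let d : Int := r0 - c0
  let s : Int := r0 + c0
  ((PySem.List.pyRange (max 1 d) (min L (d + L - 1) + 1) 1).map (fun r => pvB_cell t r (r - d)),
   ((PySem.List.pyRange (max 1 (s - L + 1)) (min L s + 1) 1).map (fun r => pvB_cell t r (s - r))).reverse)

-- ===== PRECONDITION & SPEC =====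
-- Pre_ is exactly the inputs on which Python A returns: p[0] must be a single character (else ord raises
-- TypeError) and every visited diagonal cell must satisfy cria_posicao's bounds (row ≤ 10, column ≤ 'j')
-- and lie inside its (possibly ragged) row of t (else ValueError / IndexError).
def Pre_obtem_linhas_diagonais (t : List (List Int)) (p : String × Int) : Prop :=
  p.1.toList.length = 1 ∧
  (∀ r ∈ PySem.List.pyRange (max 1 (p.2 - (((p.1.toList.headD 'a').toNat : Int) - 97)))
      (min (2 * ((t.length / 2 : Nat) : Int)) ((p.2 - (((p.1.toList.headD 'a').toNat : Int) - 97)) + 2 * ((t.length / 2 : Nat) : Int) - 1) + 1) 1,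
      r ≤ 10 ∧ r - (p.2 - (((p.1.toList.headD 'a').toNat : Int) - 97)) ≤ 9 ∧
        r - (p.2 - (((p.1.toList.headD 'a').toNat : Int) - 97)) < ((t.getD (r - 1).toNat []).length : Int)) ∧
  (∀ r ∈ PySem.List.pyRange (max 1 ((p.2 + (((p.1.toList.headD 'a').toNat : Int) - 97)) - 2 * ((t.length / 2 : Nat) : Int) + 1))
      (min (2 * ((t.length / 2 : Nat) : Int)) (p.2 + (((p.1.toList.headD 'a').toNat : Int) - 97)) + 1) 1,
      r ≤ 10 ∧ (p.2 + (((p.1.toList.headD 'a').toNat : Int) - 97)) - r ≤ 9 ∧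
        (p.2 + (((p.1.toList.headD 'a').toNat : Int) - 97)) - r < ((t.getD (r - 1).toNat []).length : Int))
instance (t : List (List Int)) (p : String × Int) : Decidable (Pre_obtem_linhas_diagonais t p) := by unfold Pre_obtem_linhas_diagonais; infer_instance

def pvWitness_obtem_linhas_diagonais : List (List Int) × (String × Int) := ([[1, 2], [3, 4]], ("a", 1))

def Spec_obtem_linhas_diagonais (t : List (List Int)) (p : String × Int) (out : (List ((String × Int) × Int)) × (List ((String × Int) × Int))) : Prop := out = obtem_linhas_diagonais_alt t p
instance (t : List (List Int)) (p : String × Int) (out : (List ((String × Int) × Int)) × (List ((String × Int) × Int))) : Decidable (Spec_obtem_linhas_diagonais t p out) := by unfold Spec_obtem_linhas_diagonais; infer_instance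

-- ===== CLAIM (what is proved, stated in full; the proofs are below) =====
def Claim_equal_obtem_linhas_diagonais : Prop := ∀ (t : List (List Int)) (p : String × Int), Dom_obtem_linhas_diagonais t p → Pre_obtem_linhas_diagonais t p → Spec_obtem_linhas_diagonais t p (obtem_linhas_diagonais t p)

-- ===== LEMMAS AND PROOFS =====

theorem pvWitness_ok : Dom_obtem_linhas_diagonais pvWitness_obtem_linhas_diagonais.1 pvWitness_obtem_linhas_diagonais.2 ∧ Pre_obtem_linhas_diagonais pvWitness_obtem_linhas_diagonais.1 pvWitness_obtem_linhas_diagonais.2 := by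
  constructor <;> decide

-- the backward walk keeps l - c and ends at the stop condition l ≤ 1 ∨ c ≤ 0
theorem pvA_seek1_spec (l c : Int) :
    (pvA_seek1 l c).1 - (pvA_seek1 l c).2 = l - c ∧ (pvA_seek1 l c).1 ≤ max 1 (l - c) := by
  fun_induction pvA_seek1 l c with
  | case1 l c h ih => simpa using ih
  | case2 l c h => exact ⟨rfl, by show l ≤ max 1 (l - c); omega⟩

theorem pvA_seek2_spec (L l c : Int) :
    (pvA_seek2 L l c).1 + (pvA_seek2 L l c).2 = l + c ∧ min L (l + c) ≤ (pvA_seek2 L l c).1 := by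
  fun_induction pvA_seek2 L l c with
  | case1 l c h ih => simpa using ih
  | case2 l c h => exact ⟨rfl, by show min L (l + c) ≤ l; omega⟩

-- the diagonal scan started at the first valid cell is the closed-form range
theorem pvA_diag2_main (t : List (List Int)) (L d l : Int) (hl : max 1 d ≤ l) :
    pvA_diag2 t L L l (l - d) =
      (PySem.List.pyRange l (min L (d + L - 1) + 1) 1).map (fun r => pvB_cell t r (r - d)) := by
  by_cases h : l ≤ L ∧ l - d < L
  · rw [pvA_diag2]
    rw [dif_pos h, if_pos (by omega)]
    rw [PySem.List.pyRange_one_cons (by omega)]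
    have ih := pvA_diag2_main t L d (l + 1) (by omega)
    have : l + 1 - d = l - d + 1 := by omega
    rw [this] at ih
    simp only [List.map_cons, ih, pvB_cell]
    rfl
  · rw [pvA_diag2, dif_neg (by omega)]
    rw [PySem.List.pyRange_one_eq_nil (by omega)]
    simp
termination_by (L - (l - d)).toNat
decreasing_by omega

-- the diagonal scan emits nothing before the first valid cell
theorem pvA_diag2_skip (t : List (List Int)) (L d l : Int) (hl : l ≤ max 1 d) :
    pvA_diag2 t L L l (l - d) = pvA_diag2 t L L (max 1 d) (max 1 d - d) := by
  rcases eq_or_lt_of_le hl with heq | hlt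
  · rw [heq]
  · by_cases h : l ≤ L ∧ l - d < L
    · rw [pvA_diag2, dif_pos h, if_neg (by omega)]
      have ih := pvA_diag2_skip t L d (l + 1) (by omega)
      have : l + 1 - d = l - d + 1 := by omega
      rw [this] at ih
      simpa using ih
    · rw [pvA_diag2, dif_neg (by omega), pvA_diag2, dif_neg (by omega)]
termination_by (max 1 d - l).toNat
decreasing_by omega

-- the antidiagonal scan started at the last valid cell is the reversed closed-form range
theorem pvA_anti2_main (t : List (List Int)) (L s l : Int) (hL : 0 ≤ L) (hl : l ≤ min L s) :
    pvA_anti2 t L L l (s - l) =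
      ((PySem.List.pyRange (max 1 (s - L + 1)) (l + 1) 1).map (fun r => pvB_cell t r (s - r))).reverse := by
  by_cases h : 0 < l ∧ s - l < L
  · rw [pvA_anti2]
    rw [dif_pos h, if_pos (by omega)]
    rw [PySem.List.pyRange_one_succ_right (by omega)]
    have ih := pvA_anti2_main t L s (l - 1) hL (by omega)
    have h1 : s - (l - 1) = s - l + 1 := by omega
    have h2 : l - 1 + 1 = l := by omega
    rw [h1, h2] at ih
    simp only [List.map_append, List.map_cons, List.map_nil, List.reverse_append,
      List.reverse_cons, List.reverse_nil, List.nil_append, List.cons_append, ih, pvB_cell]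
  · rw [pvA_anti2, dif_neg (by omega)]
    rw [PySem.List.pyRange_one_eq_nil (by omega)]
    simp
termination_by (L - (s - l)).toNat
decreasing_by omega

-- the antidiagonal scan emits nothing before the last valid cell
theorem pvA_anti2_skip (t : List (List Int)) (L s l : Int) (hL : 0 ≤ L) (hl : min L s ≤ l) :
    pvA_anti2 t L L l (s - l) = pvA_anti2 t L L (min L s) (s - min L s) := by
  rcases eq_or_lt_of_le hl with heq | hlt
  · rw [← heq]
  · by_cases h : 0 < l ∧ s - l < L
    · rw [pvA_anti2, dif_pos h, if_neg (by omega)]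
      have ih := pvA_anti2_skip t L s (l - 1) hL (by omega)
      have : s - (l - 1) = s - l + 1 := by omega
      rw [this] at ih
      simpa using ih
    · rw [pvA_anti2, dif_neg (by omega), pvA_anti2, dif_neg (by omega)]
termination_by (l - min L s).toNat
decreasing_by omega

-- ===== VERDICT (by name: the statement is the Claim_ definition above) =====
theorem obtem_linhas_diagonais_spec : Claim_equal_obtem_linhas_diagonais := by
  intro t p _ _
  unfold Spec_obtem_linhas_diagonais obtem_linhas_diagonais obtem_linhas_diagonais_alt
  simp only []
  set L : Int := 2 * ((t.length / 2 : Nat) : Int) with hLdef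
  have hL : 0 ≤ L := by positivity
  set r0 : Int := p.2
  set c0 : Int := ((p.1.toList.headD 'a').toNat : Int) - 97
  set d : Int := r0 - c0 with hd
  set s : Int := r0 + c0 with hs
  obtain ⟨h1inv, h1le⟩ := pvA_seek1_spec r0 c0
  obtain ⟨h2inv, h2le⟩ := pvA_seek2_spec L r0 c0
  simp only [Prod.mk.injEq]
  refine ⟨?_, ?_⟩
  · have hc : (pvA_seek1 r0 c0).2 = (pvA_seek1 r0 c0).1 - d := by omega
    rw [hc, pvA_diag2_skip t L d _ (by omega),
        pvA_diag2_main t L d (max 1 d) le_rfl]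
  · have hc : (pvA_seek2 L r0 c0).2 = s - (pvA_seek2 L r0 c0).1 := by omega
    rw [hc, pvA_anti2_skip t L s _ hL (by omega),
        pvA_anti2_main t L s (min L s) hL le_rfl]
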